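-- pv_equiv track=rewrite | github.com/MountainGray/advent | 2020/day17/q2.py | padGrid
-- ===== SOURCE A (Python) =====
-- def padGrid(points):
--     p2=points.copy()
--     for key, val in points.items():
--         if val==True:
--             for x in (-1, 0, 1):
--                 for y in (-1, 0, 1):
--                     for z in (-1, 0, 1):
--                         for w in (-1,0,1):
--                             if  x != 0 or y!=0 or z!=0 or w!=0:
--                                 if (key[0]+x,key[1]+y,key[2]+z, key[3]+w) not in points:
--                                     p2[(key[0]+x,key[1]+y,key[2]+z,key[3]+w)]=False
--     return p2
-- ===== SOURCE B (Python) =====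
-- def padGrid(points):
--     # Separable dilation: grow the active-cell set by +-1 along one axis at a
--     # time (four staged passes), then overlay inactive defaults under the
--     # original cells with setdefault.
--     cells = {k: None for k, v in points.items() if v}
--     for axis in range(4):
--         cells = {k[:axis] + (k[axis] + d,) + k[axis + 1:]: None
--                  for k in cells for d in (-1, 0, 1)}
--     p2 = dict(points)
--     for k in cells:
--         p2.setdefault(k, False)
--     return p2
-- ===== Notes on version B (the rewrite author's own statement) =====
-- stated objective: alternative
-- what changed: A enumerates each active cell's 80 offset neighbours with four nested loops and a 'not in points' test inserting directly; B instead computes the neighbourhood set by separable dilation - four staged passes, each growing the cell set by -1/0/+1 along a single axis - and then overlays inactive defaults under the original cells with setdefault.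
import Mathlib
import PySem

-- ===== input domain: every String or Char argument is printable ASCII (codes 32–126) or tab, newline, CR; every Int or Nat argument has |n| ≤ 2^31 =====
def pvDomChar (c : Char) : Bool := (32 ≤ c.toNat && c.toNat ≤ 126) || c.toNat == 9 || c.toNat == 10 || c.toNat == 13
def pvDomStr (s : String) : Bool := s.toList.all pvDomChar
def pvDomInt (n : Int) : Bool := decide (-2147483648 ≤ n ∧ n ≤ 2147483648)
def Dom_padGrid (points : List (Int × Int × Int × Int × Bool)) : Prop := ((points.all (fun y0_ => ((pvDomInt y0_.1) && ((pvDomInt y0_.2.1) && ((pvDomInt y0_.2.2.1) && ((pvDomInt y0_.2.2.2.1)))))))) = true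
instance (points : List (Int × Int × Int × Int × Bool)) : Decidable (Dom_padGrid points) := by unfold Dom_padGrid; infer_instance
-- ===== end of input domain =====

-- B replaces A's nested offset loops with 'not in points' test by separable
-- dilation: four staged passes each growing the active-cell set ±1 along one
-- axis, then a setdefault overlay (objective: alternative).

abbrev PVKey : Type := Int × Int × Int × Int

-- ===== PORT A =====
-- the dict[tuple,bool] argument arrives as a flat 5-tuple list; both ports first
-- rebuild the Python dict (insertion order, last value for a repeated key wins,
-- exactly like Python's dict construction) and return its items re-flattened.
def pvToDict (points : List (Int × Int × Int × Int × Bool)) : PySem.Dict PVKey Bool :=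
  points.foldl (fun d e => d.insert (e.1, e.2.1, e.2.2.1, e.2.2.2.1) e.2.2.2.2) PySem.Dict.empty

def pvOfDict (d : PySem.Dict PVKey Bool) : List (Int × Int × Int × Int × Bool) :=
  d.items.map (fun p => (p.1.1, p.1.2.1, p.1.2.2.1, p.1.2.2.2, p.2))

def padGridCore (d : PySem.Dict PVKey Bool) : PySem.Dict PVKey Bool :=
  d.items.foldl (fun p2 kv =>
    if kv.2 = true then
      ([-1, 0, 1] : List Int).foldl (fun p2 x =>
        ([-1, 0, 1] : List Int).foldl (fun p2 y =>
          ([-1, 0, 1] : List Int).foldl (fun p2 z =>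
            ([-1, 0, 1] : List Int).foldl (fun p2 w =>
              if x ≠ 0 ∨ y ≠ 0 ∨ z ≠ 0 ∨ w ≠ 0 then
                if d.contains (kv.1.1 + x, kv.1.2.1 + y, kv.1.2.2.1 + z, kv.1.2.2.2 + w) = false then
                  p2.insert (kv.1.1 + x, kv.1.2.1 + y, kv.1.2.2.1 + z, kv.1.2.2.2 + w) false
                else p2
              else p2) p2) p2) p2) p2
    else p2) d

def padGrid (points : List (Int × Int × Int × Int × Bool)) : List (Int × Int × Int × Int × Bool) :=
  pvOfDict (padGridCore (pvToDict points))

-- ===== PORT B =====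
-- k[:axis] + (k[axis] + d,) + k[axis+1:] of Source B, for the four axes
def pvBump (axis : Int) (k : PVKey) (d : Int) : PVKey :=
  if axis = 0 then (k.1 + d, k.2.1, k.2.2.1, k.2.2.2)
  else if axis = 1 then (k.1, k.2.1 + d, k.2.2.1, k.2.2.2)
  else if axis = 2 then (k.1, k.2.1, k.2.2.1 + d, k.2.2.2)
  else (k.1, k.2.1, k.2.2.1, k.2.2.2 + d)

-- Source B's `cells` dicts carry only None values, so they are ported as PySem.Set
def padGridAltCore (dct : PySem.Dict PVKey Bool) : PySem.Dict PVKey Bool :=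
  let cells0 : PySem.Set PVKey :=
    PySem.Set.ofList (dct.items.filterMap (fun kv => if kv.2 = true then some kv.1 else none))
  let cells := (PySem.List.pyRange 0 4 1).foldl
    (fun cells axis =>
      PySem.Set.ofList (cells.flatMap (fun k => ([-1, 0, 1] : List Int).map (pvBump axis k)))) cells0
  cells.foldl (fun p2 k => p2.setdefault k false) dct

def padGrid_alt (points : List (Int × Int × Int × Int × Bool)) : List (Int × Int × Int × Int × Bool) :=
  pvOfDict (padGridAltCore (pvToDict points))

-- ===== PRECONDITION & SPEC =====
def Spec_padGrid (points : List (Int × Int × Int × Int × Bool)) (out : List (Int × Int × Int × Int × Bool)) : Prop := out = padGrid_alt points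
instance (points : List (Int × Int × Int × Int × Bool)) (out : List (Int × Int × Int × Int × Bool)) : Decidable (Spec_padGrid points out) := by unfold Spec_padGrid; infer_instance

-- ===== CLAIM (what is proved, stated in full; the proofs are below) =====
def Claim_equal_padGrid : Prop := ∀ (points : List (Int × Int × Int × Int × Bool)), Dom_padGrid points → Spec_padGrid points (padGrid points)


-- ===== LEMMAS AND PROOFS =====

-- proof-side notions: the offset table, the streams of neighbour keys
def pvShift (k o : PVKey) : PVKey := (k.1 + o.1, k.2.1 + o.2.1, k.2.2.1 + o.2.2.1, k.2.2.2 + o.2.2.2)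

def pvOffsets : List PVKey :=
  ([-1, 0, 1] : List Int).flatMap (fun x =>
    ([-1, 0, 1] : List Int).flatMap (fun y =>
      ([-1, 0, 1] : List Int).flatMap (fun z =>
        ([-1, 0, 1] : List Int).map (fun w => (x, y, z, w)))))

def pvGuard (o : PVKey) : Bool := decide (o ≠ ((0 : Int), (0 : Int), (0 : Int), (0 : Int)))

def pvStep (d p2 : PySem.Dict PVKey Bool) (n : PVKey) : PySem.Dict PVKey Bool :=
  if d.contains n = false then p2.insert n false else p2

-- stream of all 81 (resp. 80 off-centre) neighbour keys of the active cells, in loop order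
def pvS81 (d : PySem.Dict PVKey Bool) : List PVKey :=
  d.items.flatMap (fun kv => if kv.2 = true then pvOffsets.map (pvShift kv.1) else [])

def pvS80 (d : PySem.Dict PVKey Bool) : List PVKey :=
  d.items.flatMap (fun kv => if kv.2 = true then (pvOffsets.filter pvGuard).map (pvShift kv.1) else [])

-- the genuinely new keys A appends, in discovery order
def pvT (d : PySem.Dict PVKey Bool) : List PVKey :=
  (pvS80 d).filter (fun k => !d.contains k)

-- A's four nested offset loops are one fold over the guarded offset table
theorem pvA_inner (d p2 : PySem.Dict PVKey Bool) (kv : PVKey × Bool) :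
    ([-1, 0, 1] : List Int).foldl (fun p2 x =>
        ([-1, 0, 1] : List Int).foldl (fun p2 y =>
          ([-1, 0, 1] : List Int).foldl (fun p2 z =>
            ([-1, 0, 1] : List Int).foldl (fun p2 w =>
              if x ≠ 0 ∨ y ≠ 0 ∨ z ≠ 0 ∨ w ≠ 0 then
                if d.contains (kv.1.1 + x, kv.1.2.1 + y, kv.1.2.2.1 + z, kv.1.2.2.2 + w) = false then
                  p2.insert (kv.1.1 + x, kv.1.2.1 + y, kv.1.2.2.1 + z, kv.1.2.2.2 + w) false
                else p2
              else p2) p2) p2) p2) p2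
    = ((pvOffsets.filter pvGuard).map (pvShift kv.1)).foldl (pvStep d) p2 := by
  rw [List.foldl_map, List.foldl_filter]
  simp only [pvOffsets, List.foldl_flatMap, List.foldl_map]
  simp only [pvStep, pvShift, pvGuard, ne_eq, Prod.mk.injEq, decide_eq_true_eq, not_and_or]

theorem pvFoldIf {kappa : Type} (l : List (PVKey × Bool)) (f : PVKey → List kappa)
    (step : PySem.Dict PVKey Bool → kappa → PySem.Dict PVKey Bool) (init : PySem.Dict PVKey Bool) :
    l.foldl (fun p2 kv => if kv.2 = true then (f kv.1).foldl step p2 else p2) init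
    = (l.flatMap (fun kv => if kv.2 = true then f kv.1 else [])).foldl step init := by
  rw [List.foldl_flatMap]
  have hf : (fun (p2 : PySem.Dict PVKey Bool) (kv : PVKey × Bool) =>
      if kv.2 = true then (f kv.1).foldl step p2 else p2)
      = (fun acc kv => ((if kv.2 = true then f kv.1 else []).foldl step acc)) := by
    funext p2 kv; cases kv.2 <;> simp
  rw [hf]

-- A's whole loop is: insert every genuinely new key, in discovery order
theorem pvA_eq (d : PySem.Dict PVKey Bool) :
    padGridCore d = (pvT d).foldl (fun p k => p.insert k false) d := by
  unfold padGridCore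
  simp only [pvA_inner]
  rw [pvFoldIf d.items (fun k => (pvOffsets.filter pvGuard).map (pvShift k)) (pvStep d) d]
  rw [pvT, List.foldl_filter]
  show (pvS80 d).foldl (pvStep d) d = _
  simp only [Bool.not_eq_true']
  rfl

-- generic insert-false fold: lookup
theorem pvGetFoldIns (l : List PVKey) (d : PySem.Dict PVKey Bool) (k : PVKey) :
    (l.foldl (fun p n => p.insert n false) d).get? k
    = if k ∈ l then some false else d.get? k := by
  induction l generalizing d with
  | nil => simp
  | cons x t ih =>
    rw [List.foldl_cons, ih]
    by_cases hk : k ∈ t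
    · simp [hk]
    · by_cases hx : k = x
      · simp [hx]
      · simp [hk, hx, PySem.Dict.get?_insert]

-- Set: filter commutes with update/ofList
theorem pvFilterUpdate {alpha : Type} [BEq alpha] [LawfulBEq alpha] (p : alpha → Bool)
    (l s : List alpha) :
    (PySem.Set.update s l).filter p = PySem.Set.update (s.filter p) (l.filter p) := by
  induction l generalizing s with
  | nil => simp [PySem.Set.update]
  | cons x t ih =>
    rw [PySem.Set.update_cons]
    by_cases hp : p x = true
    · rw [List.filter_cons_of_pos hp, PySem.Set.update_cons, ih]
      congr 1
      simp only [PySem.Set.add]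
      by_cases hm : x ∈ s
      · rw [if_pos (by simp [PySem.Set.contains, List.contains_eq_mem, hm]),
          if_pos (by simp [PySem.Set.contains, List.contains_eq_mem, List.mem_filter, hm, hp])]
      · rw [if_neg (by simp [PySem.Set.contains, List.contains_eq_mem, hm]),
          if_neg (by simp [PySem.Set.contains, List.contains_eq_mem, List.mem_filter, hm]),
          List.filter_append]
        simp [hp]
    · rw [List.filter_cons_of_neg (by simpa using hp), ih]
      congr 1
      simp only [PySem.Set.add]
      by_cases hm : PySem.Set.contains s x = true
      · rw [if_pos hm]
      · rw [if_neg hm, List.filter_append]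
        simp [hp]

theorem pvFilterOfList {alpha : Type} [BEq alpha] [LawfulBEq alpha] (p : alpha → Bool)
    (l : List alpha) :
    (PySem.Set.ofList l).filter p = PySem.Set.ofList (l.filter p) := by
  rw [← PySem.Set.update_nil_left, pvFilterUpdate, List.filter_nil, PySem.Set.update_nil_left]

-- updating a set with elements it already has changes nothing
theorem pvUpdateSubset {alpha : Type} [BEq alpha] [LawfulBEq alpha] (s xs : List alpha)
    (h : ∀ x ∈ xs, x ∈ s) : PySem.Set.update s xs = s := by
  rw [PySem.Set.update_eq_append_filter]
  have hnil : ((PySem.Set.ofList xs).filter (fun y => !PySem.Set.contains s y)) = [] := by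
    rw [List.filter_eq_nil_iff]
    intro a ha
    have : a ∈ s := h a ((PySem.Set.mem_ofList xs a).1 ha)
    simp [PySem.Set.contains, List.contains_eq_mem, this]
  rw [hnil, List.append_nil]

theorem pvShiftZero (k : PVKey) : pvShift k ((0 : Int), (0 : Int), (0 : Int), (0 : Int)) = k := by
  obtain ⟨a, b, c, e⟩ := k
  simp [pvShift]

theorem pvContainsOfMem (d : PySem.Dict PVKey Bool) (kv : PVKey × Bool) (h : kv ∈ d.items) :
    d.contains kv.1 = true := by
  simp only [PySem.Dict.contains, List.any_eq_true]
  exact ⟨kv, h, by simp⟩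

-- filtering away the existing keys: the centre cell never survives,
-- so the 81- and 80-offset streams agree
theorem pvFilterS (d : PySem.Dict PVKey Bool) :
    (pvS81 d).filter (fun k => !d.contains k) = pvT d := by
  rw [pvT, pvS80, pvS81]
  have haux : ∀ (l : List (PVKey × Bool)), (∀ kv ∈ l, d.contains kv.1 = true) →
      ((l.flatMap (fun kv => if kv.2 = true then pvOffsets.map (pvShift kv.1) else [])).filter
        (fun k => !d.contains k))
      = ((l.flatMap (fun kv => if kv.2 = true then (pvOffsets.filter pvGuard).map (pvShift kv.1) else [])).filter
        (fun k => !d.contains k)) := by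
    intro l hl
    induction l with
    | nil => simp
    | cons kv t ih =>
      rw [List.flatMap_cons, List.flatMap_cons, List.filter_append, List.filter_append,
        ih (fun q hq => hl q (List.mem_cons_of_mem _ hq))]
      congr 1
      cases hv : kv.2
      · simp
      · simp only [if_true]
        rw [List.filter_map, List.filter_map, List.filter_filter]
        congr 1
        apply List.filter_congr
        intro o _
        by_cases ho : o = ((0 : Int), (0 : Int), (0 : Int), (0 : Int))
        · subst ho
          simp [Function.comp, pvShiftZero, hl kv (List.mem_cons_self), pvGuard]
        · simp [pvGuard, ho]
  exact haux d.items (fun kv h => pvContainsOfMem d kv h)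

theorem pvFlatMapAssoc {alpha beta gamma : Type} (l : List alpha)
    (f : alpha → List beta) (g : beta → List gamma) :
    (l.flatMap f).flatMap g = l.flatMap (fun x => (f x).flatMap g) := by
  induction l with
  | nil => rfl
  | cons x t ih => simp [List.flatMap_cons, List.flatMap_append, ih]

-- dedup before a flatMap does not change the dedup of the flatMap
theorem pvOfListFlatMap {alpha beta : Type} [BEq alpha] [LawfulBEq alpha]
    [BEq beta] [LawfulBEq beta] (f : alpha → List beta) (l : List alpha) :
    PySem.Set.ofList ((PySem.Set.ofList l).flatMap f) = PySem.Set.ofList (l.flatMap f) := by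
  induction l using List.reverseRecOn with
  | nil => simp
  | append_singleton t x ih =>
    rw [PySem.Set.ofList_append_singleton, List.flatMap_append, PySem.Set.ofList_append,
      ← ih, List.flatMap_singleton]
    simp only [PySem.Set.add]
    by_cases hx : PySem.Set.contains (PySem.Set.ofList t) x = true
    · rw [if_pos hx]
      have hmem : x ∈ PySem.Set.ofList t := by
        simpa [PySem.Set.contains, List.contains_eq_mem] using hx
      rw [pvUpdateSubset]
      intro b hb
      rw [PySem.Set.mem_ofList]
      exact List.mem_flatMap.2 ⟨x, hmem, hb⟩
    · rw [if_neg hx, List.flatMap_append, PySem.Set.ofList_append, List.flatMap_singleton]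

-- the comprehension over the active cells, as a flatMap with an if
theorem pvFlatMapFilterMap {beta : Type} (l : List (PVKey × Bool)) (g : PVKey → List beta) :
    (l.filterMap (fun kv => if kv.2 = true then some kv.1 else none)).flatMap g
    = l.flatMap (fun kv => if kv.2 = true then g kv.1 else []) := by
  induction l with
  | nil => rfl
  | cons kv t ih =>
    cases hv : kv.2 <;>
      simp [List.flatMap_cons, hv, ih]

-- B's staged dilation computes exactly the dedup of the 81-stream
theorem pvCells_eq (d : PySem.Dict PVKey Bool) :
    ((PySem.List.pyRange 0 4 1).foldl
      (fun cells axis =>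
        PySem.Set.ofList (cells.flatMap (fun k => ([-1, 0, 1] : List Int).map (pvBump axis k))))
      (PySem.Set.ofList (d.items.filterMap (fun kv => if kv.2 = true then some kv.1 else none))))
    = PySem.Set.ofList (pvS81 d) := by
  have hr : PySem.List.pyRange 0 4 1 = [0, 1, 2, 3] := by decide
  rw [hr]
  simp only [List.foldl_cons, List.foldl_nil]
  simp only [pvOfListFlatMap]
  rw [pvFlatMapAssoc, pvFlatMapAssoc, pvFlatMapAssoc]
  rw [pvFlatMapFilterMap]
  rw [pvS81]
  congr 1

-- the setdefault overlay over a duplicate-free list is an insert fold over its new keys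
theorem pvSetdefaultFold (l : List PVKey) (hl : l.Nodup) (d : PySem.Dict PVKey Bool) :
    l.foldl (fun p2 k => p2.setdefault k false) d
    = (l.filter (fun k => !d.contains k)).foldl (fun p k => p.insert k false) d := by
  induction l generalizing d with
  | nil => rfl
  | cons x t ih =>
    rw [List.nodup_cons] at hl
    rw [List.foldl_cons, List.filter_cons]
    cases hc : d.contains x
    · rw [PySem.Dict.setdefault_of_not_contains _ _ hc]
      simp only [Bool.not_false, if_true, List.foldl_cons]
      rw [ih hl.2]
      congr 1
      apply List.filter_congr
      intro a ha
      have hax : (a == x) = false := by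
        simp only [beq_eq_false_iff_ne, ne_eq]
        exact fun h => hl.1 (h ▸ ha)
      rw [PySem.Dict.contains_insert, hax, Bool.false_or]
    · rw [PySem.Dict.setdefault_of_contains _ _ hc]
      simp only [Bool.not_true, Bool.false_eq_true, if_false]
      exact ih hl.2 d

-- an insert-false fold only depends on the dedup of its key list
theorem pvInsFoldOfList (l : List PVKey) (d : PySem.Dict PVKey Bool) (h : d.keys.Nodup) :
    l.foldl (fun p k => p.insert k false) d
    = (PySem.Set.ofList l).foldl (fun p k => p.insert k false) d := by
  apply PySem.Dict.ext
  have h1 : (l.foldl (fun p k => p.insert k false) d).keys.Nodup :=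
    PySem.Dict.nodup_keys_foldl_insert l (fun _ _ => false) d h
  have h2 : ((PySem.Set.ofList l).foldl (fun p k => p.insert k false) d).keys.Nodup :=
    PySem.Dict.nodup_keys_foldl_insert _ (fun _ _ => false) d h
  have hkeys : (l.foldl (fun p k => p.insert k false) d).keys
      = ((PySem.Set.ofList l).foldl (fun p k => p.insert k false) d).keys := by
    rw [PySem.Dict.keys_foldl_insert l (fun _ _ => false) d,
      PySem.Dict.keys_foldl_insert (PySem.Set.ofList l) (fun _ _ => false) d,
      PySem.Set.update_eq_append_filter, PySem.Set.update_eq_append_filter,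
      PySem.Set.ofList_ofList]
  rw [PySem.Dict.items_eq_map_keys _ h1 false, PySem.Dict.items_eq_map_keys _ h2 false, ← hkeys]
  apply List.map_congr_left
  intro k _
  rw [PySem.Dict.getD_eq_get?_getD, PySem.Dict.getD_eq_get?_getD, pvGetFoldIns, pvGetFoldIns]
  by_cases hk : k ∈ l
  · simp [hk, PySem.Set.mem_ofList]
  · simp [hk, PySem.Set.mem_ofList]

theorem pvCore_eq (d : PySem.Dict PVKey Bool) (h : d.keys.Nodup) :
    padGridCore d = padGridAltCore d := by
  rw [pvA_eq]
  simp only [padGridAltCore]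
  rw [pvCells_eq d]
  rw [pvSetdefaultFold _ (PySem.Set.nodup_ofList (pvS81 d)) d]
  rw [pvFilterOfList, pvFilterS]
  exact pvInsFoldOfList (pvT d) d h

theorem pvNodupToDict (points : List (Int × Int × Int × Int × Bool)) :
    (pvToDict points).keys.Nodup :=
  PySem.Dict.nodup_keys_foldl_insert_key points (fun e => (e.1, e.2.1, e.2.2.1, e.2.2.2.1))
    (fun _ e => e.2.2.2.2) PySem.Dict.empty PySem.Dict.nodup_keys_empty

-- ===== VERDICT (by name: the statement is the Claim_ definition above) =====
theorem padGrid_spec : Claim_equal_padGrid := by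
  intro points _
  unfold Spec_padGrid padGrid padGrid_alt
  rw [pvCore_eq _ (pvNodupToDict points)]
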